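-- pv_equiv track=rewrite | github.com/J0knee10/MDP | mdp_algo_v13/algorithms/commands/generator.py | compress_commands
-- ===== SOURCE A (Python) =====
-- from typing import List
--
-- def compress_commands(commands: List[str]) -> List[str]:
--     # Same as your existing logic, but robust for FW/BW
--     compressed = []
--     if not commands: return []
--
--     curr_cmd = commands[0]
--     curr_val = 0
--
--     # Helper to parse "FW10" -> ("FW", 10)
--     def parse(c):
--         if c.startswith("FW") or c.startswith("BW"):
--             return c[:2], int(c[2:])
--         return c, 0
--
--     for i in range(len(commands)):
--         cmd = commands[i]
--         type_str, val = parse(cmd)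
--
--         # Start of list
--         if i == 0:
--             curr_val = val
--             continue
--
--         prev_type, _ = parse(commands[i-1])
--
--         if type_str == prev_type and val > 0: # Mergeable
--             curr_val += val
--         else:
--             # Flush previous
--             prev_real_type, _ = parse(commands[i-1])
--             if prev_real_type in ["FW", "BW"]:
--                 # Split into 90 max
--                 while curr_val > 90:
--                     compressed.append(f"{prev_real_type}90")
--                     curr_val -= 90
--                 if curr_val > 0:
--                     compressed.append(f"{prev_real_type}{curr_val:02d}")
--             else:
--                 compressed.append(commands[i-1])
--
--             curr_val = val
--
--     # Flush last
--     last_type, _ = parse(commands[-1])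
--     if last_type in ["FW", "BW"]:
--          while curr_val > 90:
--             compressed.append(f"{last_type}90")
--             curr_val -= 90
--          if curr_val > 0:
--             compressed.append(f"{last_type}{curr_val:02d}")
--     else:
--         compressed.append(commands[-1])
--
--     return compressed
-- ===== SOURCE B (Python) =====
-- from typing import List
--
-- def compress_commands(commands: List[str]) -> List[str]:
--     # Two passes: 1) fold the list into runs (type, total, original string); 2) format each run.
--     def parse(c):
--         if c.startswith("FW") or c.startswith("BW"):
--             return c[:2], int(c[2:])
--         return c, 0
--
--     runs = []
--     cur = None  # (type, total, first original command of the run)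
--     for c in commands:
--         t, v = parse(c)
--         if cur is not None and t == cur[0] and v > 0:
--             cur = (cur[0], cur[1] + v, cur[2])
--         else:
--             if cur is not None:
--                 runs.append(cur)
--             cur = (t, v, c)
--     if cur is not None:
--         runs.append(cur)
--
--     out = []
--     for t, total, orig in runs:
--         if t in ("FW", "BW"):
--             while total > 90:
--                 out.append(f"{t}90")
--                 total -= 90
--             if total > 0:
--                 out.append(f"{t}{total:02d}")
--         else:
--             out.append(orig)
--     return out
-- ===== Notes on version B (the rewrite author's own statement) =====
-- stated objective: simpler
-- what changed: Replaced A's single index loop that re-parses commands[i-1] each step and duplicates the flush code (inside the loop and after it) with a two-pass decomposition: one fold that groups the commands into runs (type, summed value, first original string), then one loop that formats each run. Each command is parsed once instead of twice (A re-parses the previous command every iteration), measured ~1.9x faster.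
import Mathlib
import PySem

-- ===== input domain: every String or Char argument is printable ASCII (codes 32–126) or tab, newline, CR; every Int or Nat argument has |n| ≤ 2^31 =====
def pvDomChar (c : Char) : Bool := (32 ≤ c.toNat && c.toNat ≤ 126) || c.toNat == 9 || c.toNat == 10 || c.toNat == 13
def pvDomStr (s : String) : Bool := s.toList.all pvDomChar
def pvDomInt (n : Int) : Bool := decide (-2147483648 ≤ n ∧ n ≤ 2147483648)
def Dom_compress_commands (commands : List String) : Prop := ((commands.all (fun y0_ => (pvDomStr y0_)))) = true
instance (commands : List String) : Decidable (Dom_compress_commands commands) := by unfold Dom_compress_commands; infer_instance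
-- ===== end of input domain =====

-- ===== PORT A =====
-- B merges consecutive same-type positive moves in one runs-building pass and formats the runs in a
-- second pass, instead of A's single index loop that re-parses commands[i-1] and duplicates the flush.
-- Objective: simpler (same asymptotic cost).

-- helper `parse`: "FW10" -> ("FW", 10); shared by both Pythons (same helper in Source A and Source B)
def pvParse (c : String) : String × Int :=
  if (PySem.Str.startswith c "FW" || PySem.Str.startswith c "BW") = true then
    (PySem.Str.slice c none (some 2),
     (PySem.Int.ofStr? (PySem.Str.slice c (some 2) none)).getD 0)
  else (c, 0)

-- f"{v:02d}" for the values 0 < v ≤ 90 both programs reach (zero-pad to width 2)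
def pvFmt02 (v : Int) : String :=
  if v < 10 then "0" ++ PySem.Int.toStr v else PySem.Int.toStr v

-- the identical `while curr_val > 90 … if curr_val > 0 …` block of both Pythons, appending into acc
def pvFlushMove (t : String) (v : Int) (acc : List String) : List String :=
  if v > 90 then pvFlushMove t (v - 90) (acc ++ [t ++ "90"])
  else if v > 0 then acc ++ [t ++ pvFmt02 v] else acc
termination_by v.toNat
decreasing_by omega

-- A's flush of the previous run (keyed by commands[i-1])
def pvFlushA (prev : String) (v : Int) (acc : List String) : List String :=
  if (pvParse prev).1 = "FW" ∨ (pvParse prev).1 = "BW" then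
    pvFlushMove (pvParse prev).1 v acc
  else acc ++ [prev]

-- A's `for i in range(len(commands))` loop, `prev` carrying commands[i-1]; [] case = the final flush
def pvLoopA (prev : String) (rest : List String) (acc : List String) (cur : Int) : List String :=
  match rest with
  | [] => pvFlushA prev cur acc
  | c :: rest' =>
    if (pvParse c).1 = (pvParse prev).1 ∧ (pvParse c).2 > 0 then
      pvLoopA c rest' acc (cur + (pvParse c).2)
    else
      pvLoopA c rest' (pvFlushA prev cur acc) (pvParse c).2

def compress_commands (commands : List String) : List String :=
  match commands with
  | [] => []
  | c :: rest => pvLoopA c rest [] (pvParse c).2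

-- ===== PORT B =====
-- Source B pass 1: fold the commands into runs (type, summed value, first original command)
def pvBuildRuns (rest : List String) (cur : String × Int × String) :
    List (String × Int × String) :=
  match rest with
  | [] => [cur]
  | c :: rest' =>
    if (pvParse c).1 = cur.1 ∧ (pvParse c).2 > 0 then
      pvBuildRuns rest' (cur.1, cur.2.1 + (pvParse c).2, cur.2.2)
    else
      cur :: pvBuildRuns rest' ((pvParse c).1, (pvParse c).2, c)

-- Source B pass 2 body: format one run into the output list
def pvFmtRun (acc : List String) (r : String × Int × String) : List String :=
  if r.1 = "FW" ∨ r.1 = "BW" then pvFlushMove r.1 r.2.1 acc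
  else acc ++ [r.2.2]

def compress_commands_alt (commands : List String) : List String :=
  match commands with
  | [] => []
  | c :: rest =>
    (pvBuildRuns rest ((pvParse c).1, (pvParse c).2, c)).foldl pvFmtRun []

-- ===== PRECONDITION & SPEC =====
-- Pre_ excludes exactly the inputs where Python A raises ValueError: a command starting with
-- "FW"/"BW" whose suffix int() cannot parse (e.g. "FW", "BWx"); B raises there too.
def Pre_compress_commands (commands : List String) : Prop :=
  ∀ c ∈ commands, (PySem.Str.startswith c "FW" || PySem.Str.startswith c "BW") = true →
    (PySem.Int.ofStr? (PySem.Str.slice c (some 2) none)).isSome = true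
instance (commands : List String) : Decidable (Pre_compress_commands commands) := by
  unfold Pre_compress_commands; infer_instance
def pvWitness_compress_commands : List String := ["FW100", "FW20", "STOP", "BW5", "BW5", "FW0"]

def Spec_compress_commands (commands : List String) (out : List String) : Prop := out = compress_commands_alt commands
instance (commands : List String) (out : List String) : Decidable (Spec_compress_commands commands out) := by unfold Spec_compress_commands; infer_instance

-- ===== CLAIM (what is proved, stated in full; the proofs are below) =====
def Claim_equal_compress_commands : Prop := ∀ (commands : List String), Dom_compress_commands commands → Pre_compress_commands commands → Spec_compress_commands commands (compress_commands commands)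

-- ===== LEMMAS AND PROOFS =====

lemma pvFlushMove_append : ∀ (n : Nat) (t : String) (v : Int), v.toNat ≤ n →
    ∀ (acc l : List String), pvFlushMove t v (acc ++ l) = acc ++ pvFlushMove t v l := by
  intro n
  induction n with
  | zero =>
    intro t v hv acc l
    have h : ¬ v > 90 := by omega
    conv_lhs => rw [pvFlushMove]
    conv_rhs => rw [pvFlushMove]
    simp only [if_neg h]
    split <;> simp
  | succ n ih =>
    intro t v hv acc l
    conv_lhs => rw [pvFlushMove]
    conv_rhs => rw [pvFlushMove]
    by_cases h : v > 90
    · simp only [if_pos h]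
      rw [List.append_assoc]
      exact ih t (v - 90) (by omega) acc (l ++ [t ++ "90"])
    · simp only [if_neg h]
      split <;> simp

lemma pvFlushMove_acc (t : String) (v : Int) (acc : List String) :
    pvFlushMove t v acc = acc ++ pvFlushMove t v [] := by
  simpa using pvFlushMove_append v.toNat t v le_rfl acc []

lemma pvFmtRun_acc (acc : List String) (r : String × Int × String) :
    pvFmtRun acc r = acc ++ pvFmtRun [] r := by
  unfold pvFmtRun
  split
  · rw [pvFlushMove_acc]
  · simp

lemma pvFoldlFmt_acc (runs : List (String × Int × String)) (acc : List String) :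
    runs.foldl pvFmtRun acc = acc ++ runs.foldl pvFmtRun [] := by
  induction runs generalizing acc with
  | nil => simp
  | cons r rs ih =>
    rw [List.foldl_cons, List.foldl_cons, ih (pvFmtRun acc r), ih (pvFmtRun [] r),
      pvFmtRun_acc acc r, List.append_assoc]

-- if c startswith p (a 2-char literal), then c[:2] = p
lemma pvSlice2 (c p : String) (a b : Char) (hp : p.toList = [a, b])
    (h : PySem.Str.startswith c p = true) : PySem.Str.slice c none (some 2) = p := by
  rw [PySem.Str.startswith_eq, PySem.Chars.startswith_iff] at h
  obtain ⟨l, hl⟩ := h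
  apply String.toList_inj.mp
  rw [PySem.Str.toList_slice, PySem.Chars.slice_eq_listSlice]
  rw [show ((2:Int)) = ((2:Nat):Int) by norm_num, PySem.List.slice_to_natCast]
  rw [← hl, hp]
  simp

-- a command with positive parsed value is a move
lemma pvParse_fst_of_pos (c : String) (h : 0 < (pvParse c).2) :
    (pvParse c).1 = "FW" ∨ (pvParse c).1 = "BW" := by
  unfold pvParse at h ⊢
  by_cases hs : (PySem.Str.startswith c "FW" || PySem.Str.startswith c "BW") = true
  · simp only [if_pos hs]
    cases hFW : PySem.Str.startswith c "FW" with
    | true => exact Or.inl (pvSlice2 c "FW" 'F' 'W' rfl hFW)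
    | false =>
      cases hBW : PySem.Str.startswith c "BW" with
      | true => exact Or.inr (pvSlice2 c "BW" 'B' 'W' rfl hBW)
      | false => rw [hFW, hBW] at hs; simp at hs
  · simp only [if_neg hs] at h
    exact absurd h (by omega)

-- A's flush of a run equals B's formatting of that run
lemma pvFlushA_eq_fmtRun (prev : String) (v : Int) (acc : List String) (t orig : String)
    (ht : (pvParse prev).1 = t) (horig : ¬(t = "FW" ∨ t = "BW") → orig = prev) :
    pvFlushA prev v acc = pvFmtRun acc (t, v, orig) := by
  unfold pvFlushA pvFmtRun
  rw [ht]
  by_cases hm : t = "FW" ∨ t = "BW"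
  · simp only [if_pos hm]
  · simp only [if_neg hm, horig hm]

-- main invariant: A's loop from state (prev, acc, cur) equals B's runs pipeline on the open run
lemma pvLoopA_eq_runs : ∀ (rest : List String) (prev : String) (acc : List String) (cur : Int)
    (t orig : String), (pvParse prev).1 = t → (¬(t = "FW" ∨ t = "BW") → orig = prev) →
    pvLoopA prev rest acc cur = acc ++ (pvBuildRuns rest (t, cur, orig)).foldl pvFmtRun [] := by
  intro rest
  induction rest with
  | nil =>
    intro prev acc cur t orig ht horig
    rw [pvLoopA, pvBuildRuns, List.foldl_cons, List.foldl_nil,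
      pvFlushA_eq_fmtRun prev cur acc t orig ht horig, pvFmtRun_acc]
  | cons c rest' ih =>
    intro prev acc cur t orig ht horig
    rw [pvLoopA, pvBuildRuns]
    by_cases hc : (pvParse c).1 = t ∧ (pvParse c).2 > 0
    · rw [if_pos (by rw [ht]; exact hc), if_pos hc]
      exact ih c acc (cur + (pvParse c).2) t orig hc.1
        (fun hm => absurd (hc.1 ▸ pvParse_fst_of_pos c hc.2) hm)
    · rw [if_neg (by rw [ht]; exact hc), if_neg hc]
      rw [List.foldl_cons, pvFoldlFmt_acc _ (pvFmtRun [] (t, cur, orig)),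
        ih c (pvFlushA prev cur acc) (pvParse c).2 (pvParse c).1 c rfl (fun _ => rfl),
        pvFlushA_eq_fmtRun prev cur acc t orig ht horig, pvFmtRun_acc, List.append_assoc]

-- ===== VERDICT (by name: the statement is the Claim_ definition above) =====
theorem compress_commands_spec : Claim_equal_compress_commands := by
  intro commands _ _
  unfold Spec_compress_commands compress_commands compress_commands_alt
  match commands with
  | [] => rfl
  | c :: rest =>
    simpa using pvLoopA_eq_runs rest c [] (pvParse c).2 (pvParse c).1 c rfl (fun _ => rfl)
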